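-- pv_equiv track=rewrite | github.com/ProofX-core/GoldBachX | SequenceGenerator/SequenceGenerator.py | _generate_twin_adjacent
-- ===== SOURCE A (Python) =====
-- import math
-- from typing import Optional, Union, List, Dict
--
-- def _generate_twin_adjacent(start: int, end: int) -> List[int]:
--     """
--     Generate even numbers where at least one Goldbach partition uses twin primes.
--     Uses a simple sieve to find primes up to end, then checks for twin prime pairs.
--     """
--     if end < 6:  # No twin primes below 6
--         return []
--
--     # Sieve of Eratosthenes up to end
--     sieve = [True] * (end + 1)
--     sieve[0] = sieve[1] = False
--     for i in range(2, int(math.sqrt(end)) + 1):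
--         if sieve[i]:
--             sieve[i*i :: i] = [False] * len(sieve[i*i :: i])
--
--     primes = [i for i, is_prime in enumerate(sieve) if is_prime]
--
--     # Identify twin primes (p, p+2 both prime)
--     twin_primes = set()
--     for i in range(len(primes) - 1):
--         if primes[i+1] == primes[i] + 2:
--             twin_primes.add(primes[i])
--             twin_primes.add(primes[i+1])
--
--     # Generate even numbers that can be expressed as sum of twin primes
--     result = set()
--     for p in twin_primes:
--         for q in twin_primes:
--             if p + q >= start and p + q <= end and (p + q) % 2 == 0:
--                 result.add(p + q)
--
--     return sorted(result)
-- ===== SOURCE B (Python) =====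
-- import math
--
-- def _generate_twin_adjacent(start, end):
--     if end < 6:
--         return []
--     sieve = [True] * (end + 1)
--     sieve[0] = sieve[1] = False
--     for i in range(2, int(math.sqrt(end)) + 1):
--         if sieve[i]:
--             for m in range(i * i, end + 1, i):
--                 sieve[m] = False
--     primes = [i for i, ok in enumerate(sieve) if ok]
--     twins = set()
--     for a, b in zip(primes, primes[1:]):
--         if b - a == 2:
--             twins.add(a)
--             twins.add(b)
--     return [s for s in range(max(start, 4), end + 1)
--             if s % 2 == 0 and any(s - p in twins for p in twins)]
-- ===== Notes on version B (the rewrite author's own statement) =====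
-- stated objective: faster
-- what changed: A enumerates all twin-prime pairs (quadratic in the number T of twin primes), collects their in-range even sums in a set and sorts it; B instead scans the candidate range once in increasing order and keeps s when s-p lands back in the twin set for some twin p (early exit on the first witness; twins found by zipping the prime list with its tail), so no pair enumeration and no sort.
import Mathlib
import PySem

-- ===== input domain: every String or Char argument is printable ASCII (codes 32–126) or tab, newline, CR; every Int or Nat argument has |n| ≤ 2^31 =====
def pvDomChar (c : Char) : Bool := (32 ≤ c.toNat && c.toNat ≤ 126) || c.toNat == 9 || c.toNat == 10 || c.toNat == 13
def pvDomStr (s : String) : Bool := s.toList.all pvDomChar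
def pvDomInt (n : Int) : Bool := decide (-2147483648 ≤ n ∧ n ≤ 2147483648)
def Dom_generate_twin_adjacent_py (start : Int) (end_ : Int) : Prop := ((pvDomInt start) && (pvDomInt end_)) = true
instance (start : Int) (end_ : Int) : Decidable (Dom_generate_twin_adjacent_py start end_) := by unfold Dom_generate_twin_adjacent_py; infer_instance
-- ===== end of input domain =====

-- B replaces A's quadratic pair-enumeration + sort of twin-prime sums by a single ordered scan of
-- the candidate range testing 's - p in twins' (and a zip-based twin detection): no pair enumeration, no sort; measured faster in a timing run.

-- ===== PORT A =====
-- int(math.sqrt(n)): exact (= math.isqrt) for the 0 ≤ n ≤ 2^31 reachable here (end ≥ 6)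
def pvISqrt (n : Int) : Int := ((Int.toNat n).sqrt : Int)

-- Sieve of Eratosthenes, A's shape: slice assignment sieve[i*i::i] = [False]*len(...)
-- (the slice indices are i*i, i*i+i, … < len(sieve), each set to False)
def pvSieveA (end_ : Int) : List Bool :=
  let sieve0 : List Bool := List.replicate (end_ + 1).toNat true
  let sieve1 := PySem.List.pySetD (PySem.List.pySetD sieve0 0 false) 1 false
  (PySem.List.pyRange 2 (pvISqrt end_ + 1) 1).foldl
    (fun s i =>
      if PySem.List.pyGetD s i false then
        (PySem.List.pyRange (i * i) (s.length : Int) i).foldl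
          (fun t m => PySem.List.pySetD t m false) s
      else s) sieve1

-- primes = [i for i, is_prime in enumerate(sieve) if is_prime]
def pvPrimesA (end_ : Int) : List Int :=
  ((PySem.List.enumerate (pvSieveA end_) 0).filter (fun p => p.2)).map (fun p => p.1)

-- for i in range(len(primes)-1): if primes[i+1] == primes[i] + 2: add both
def pvTwinsA (end_ : Int) : PySem.Set Int :=
  let primes := pvPrimesA end_
  (PySem.List.pyRange 0 ((primes.length : Int) - 1) 1).foldl
    (fun tw i =>
      if PySem.List.pyGetD primes (i + 1) 0 = PySem.List.pyGetD primes i 0 + 2 then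
        PySem.Set.add (PySem.Set.add tw (PySem.List.pyGetD primes i 0))
          (PySem.List.pyGetD primes (i + 1) 0)
      else tw) PySem.Set.empty

-- for p in twin_primes: for q in twin_primes: if …: result.add(p+q)   (order-independent: builds a set)
def pvResultA (start : Int) (end_ : Int) : PySem.Set Int :=
  let twins := pvTwinsA end_
  twins.foldl (fun r p =>
    twins.foldl (fun r q =>
      if start ≤ p + q ∧ p + q ≤ end_ ∧ PySem.Int.mod (p + q) 2 = 0 then
        PySem.Set.add r (p + q)
      else r) r) PySem.Set.empty

def generate_twin_adjacent_py (start : Int) (end_ : Int) : List Int :=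
  if end_ < 6 then []
  else PySem.List.sorted (pvResultA start end_) (fun x => x) false

-- ===== PORT B =====
-- same sieve, but the inner loop is 'for m in range(i*i, end+1, i): sieve[m] = False'
def pvSieveB (end_ : Int) : List Bool :=
  let sieve0 : List Bool := List.replicate (end_ + 1).toNat true
  let sieve1 := PySem.List.pySetD (PySem.List.pySetD sieve0 0 false) 1 false
  (PySem.List.pyRange 2 (pvISqrt end_ + 1) 1).foldl
    (fun s i =>
      if PySem.List.pyGetD s i false then
        (PySem.List.pyRange (i * i) (end_ + 1) i).foldl
          (fun t m => PySem.List.pySetD t m false) s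
      else s) sieve1

def pvPrimesB (end_ : Int) : List Int :=
  ((PySem.List.enumerate (pvSieveB end_) 0).filter (fun p => p.2)).map (fun p => p.1)

-- for a, b in zip(primes, primes[1:]): if b - a == 2: twins.add(a); twins.add(b)
def pvTwinsB (end_ : Int) : PySem.Set Int :=
  let primes := pvPrimesB end_
  (primes.zip (primes.drop 1)).foldl
    (fun tw ab =>
      if ab.2 - ab.1 = 2 then PySem.Set.add (PySem.Set.add tw ab.1) ab.2 else tw)
    PySem.Set.empty

-- [s for s in range(max(start, 4), end+1) if s % 2 == 0 and any(s - p in twins for p in twins)]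
def generate_twin_adjacent_py_alt (start : Int) (end_ : Int) : List Int :=
  if end_ < 6 then []
  else
    let twins := pvTwinsB end_
    (PySem.List.pyRange (max start 4) (end_ + 1) 1).filter
      (fun s => decide (PySem.Int.mod s 2 = 0) &&
        twins.any (fun p => PySem.Set.contains twins (s - p)))

-- ===== PRECONDITION & SPEC =====
def Spec_generate_twin_adjacent_py (start : Int) (end_ : Int) (out : List Int) : Prop := out = generate_twin_adjacent_py_alt start end_
instance (start : Int) (end_ : Int) (out : List Int) : Decidable (Spec_generate_twin_adjacent_py start end_ out) := by unfold Spec_generate_twin_adjacent_py; infer_instance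

-- ===== CLAIM (what is proved, stated in full; the proofs are below) =====
def Claim_equal_generate_twin_adjacent_py : Prop := ∀ (start : Int) (end_ : Int), Dom_generate_twin_adjacent_py start end_ → Spec_generate_twin_adjacent_py start end_ (generate_twin_adjacent_py start end_)

-- ===== LEMMAS AND PROOFS =====

-- generic: a predicate preserved by every step of a foldl
theorem pv_foldl_inv {α β : Type} (P : α → Prop) (f : α → β → α) :
    ∀ (l : List β) (s : α), P s → (∀ a b, b ∈ l → P a → P (f a b)) → P (l.foldl f s) := by
  intro l
  induction l with
  | nil => intro s hs _; exact hs
  | cons x xs ih =>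
    intro s hs hstep
    exact ih (f s x) (hstep s x (by simp) hs)
      (fun a b hb ha => hstep a b (by simp [hb]) ha)

-- generic: two foldls agree when the step functions agree on states satisfying a preserved invariant
theorem pv_foldl_eq {α β : Type} (P : α → Prop) (f g : α → β → α) :
    ∀ (l : List β) (s : α), P s →
      (∀ a b, b ∈ l → P a → f a b = g a b ∧ P (f a b)) →
      l.foldl f s = l.foldl g s := by
  intro l
  induction l with
  | nil => intro s _ _; rfl
  | cons x xs ih =>
    intro s hs hstep
    have h := hstep s x (by simp) hs
    simp only [List.foldl_cons, h.1]
    exact ih (g s x) (h.1 ▸ h.2) (fun a b hb ha => hstep a b (by simp [hb]) ha)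

-- marking loops preserve the sieve's length
theorem pv_len_foldl_pySetD (l : List Int) (s : List Bool) :
    (l.foldl (fun t m => PySem.List.pySetD t m false) s).length = s.length := by
  induction l generalizing s with
  | nil => rfl
  | cons m l ih => simp [List.foldl_cons, ih, PySem.List.length_pySetD]

theorem pv_sieve_eq (end_ : Int) (h : 0 ≤ end_) : pvSieveA end_ = pvSieveB end_ := by
  unfold pvSieveA pvSieveB
  apply pv_foldl_eq (fun s => s.length = (end_ + 1).toNat)
  · simp [PySem.List.length_pySetD]
  · intro a i _ ha
    by_cases hg : PySem.List.pyGetD a i false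
    · have hlen : (a.length : Int) = end_ + 1 := by
        rw [ha]; omega
      constructor
      · simp only [hg, if_true, hlen]
      · simp only [hg, if_true]
        rw [pv_len_foldl_pySetD, ha]
    · simp [hg, ha]

theorem pv_primes_eq (end_ : Int) (h : 0 ≤ end_) : pvPrimesA end_ = pvPrimesB end_ := by
  unfold pvPrimesA pvPrimesB
  rw [pv_sieve_eq end_ h]

-- adjacent index pairs of a list are its zip with its own tail
theorem pv_pairs_map (l : List Int) :
    (PySem.List.pyRange 0 ((l.length : Int) - 1) 1).map
      (fun i => (PySem.List.pyGetD l i 0, PySem.List.pyGetD l (i + 1) 0)) =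
      l.zip (l.drop 1) := by
  apply List.ext_getElem
  · simp [PySem.List.length_pyRange_one]
  · intro k h1 h2
    have hk : k < (PySem.List.pyRange 0 ((l.length : Int) - 1) 1).length := by
      simpa using h1
    have hkl : k + 1 < l.length := by
      simp [PySem.List.length_pyRange_one] at hk
      omega
    simp only [List.getElem_map, PySem.List.getElem_pyRange_one 0 ((l.length : Int) - 1) k hk]
    have e1 : (0 : Int) + (k : Int) = ((k : Nat) : Int) := by omega
    have e2 : (k : Int) + 1 = (((k + 1 : Nat)) : Int) := by omega
    rw [e1, e2, PySem.List.pyGetD_natCast, PySem.List.pyGetD_natCast]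
    rw [List.getElem_zip]
    simp only [List.getD_eq_getElem?_getD]
    rw [List.getElem?_eq_getElem (by omega), List.getElem?_eq_getElem hkl]
    simp

-- membership through the twin-collecting fold
theorem pv_mem_twinfold (C : Int × Int → Prop) [DecidablePred C] :
    ∀ (l : List (Int × Int)) (s : PySem.Set Int) (x : Int),
      (x ∈ l.foldl (fun tw ab =>
          if C ab then PySem.Set.add (PySem.Set.add tw ab.1) ab.2 else tw) s) ↔
        x ∈ s ∨ ∃ ab ∈ l, C ab ∧ (x = ab.1 ∨ x = ab.2) := by
  intro l
  induction l with
  | nil => simp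
  | cons ab l ih =>
    intro s x
    simp only [List.foldl_cons]
    by_cases hc : C ab
    · rw [if_pos hc, ih]
      simp only [PySem.Set.mem_add, List.mem_cons]
      constructor
      · rintro (((h | h) | h) | ⟨cd, hcd, h1, h2⟩)
        · exact Or.inl h
        · exact Or.inr ⟨ab, Or.inl rfl, hc, Or.inl h⟩
        · exact Or.inr ⟨ab, Or.inl rfl, hc, Or.inr h⟩
        · exact Or.inr ⟨cd, Or.inr hcd, h1, h2⟩
      · rintro (h | ⟨cd, (rfl | hcd), h1, h2⟩)
        · exact Or.inl (Or.inl (Or.inl h))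
        · rcases h2 with h2 | h2
          · exact Or.inl (Or.inl (Or.inr h2))
          · exact Or.inl (Or.inr h2)
        · exact Or.inr ⟨cd, hcd, h1, h2⟩
    · rw [if_neg hc, ih]
      simp only [List.mem_cons]
      constructor
      · rintro (h | ⟨cd, hcd, h1, h2⟩)
        · exact Or.inl h
        · exact Or.inr ⟨cd, Or.inr hcd, h1, h2⟩
      · rintro (h | ⟨cd, (rfl | hcd), h1, h2⟩)
        · exact Or.inl h
        · exact absurd h1 hc
        · exact Or.inr ⟨cd, hcd, h1, h2⟩

theorem pv_twins_eq (end_ : Int) (h : 0 ≤ end_) : pvTwinsA end_ = pvTwinsB end_ := by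
  unfold pvTwinsA pvTwinsB
  rw [pv_primes_eq end_ h]
  have hmap := pv_pairs_map (pvPrimesB end_)
  calc (PySem.List.pyRange 0 (((pvPrimesB end_).length : Int) - 1) 1).foldl
        (fun tw i =>
          if PySem.List.pyGetD (pvPrimesB end_) (i + 1) 0 = PySem.List.pyGetD (pvPrimesB end_) i 0 + 2 then
            PySem.Set.add (PySem.Set.add tw (PySem.List.pyGetD (pvPrimesB end_) i 0))
              (PySem.List.pyGetD (pvPrimesB end_) (i + 1) 0)
          else tw) PySem.Set.empty
      = ((PySem.List.pyRange 0 (((pvPrimesB end_).length : Int) - 1) 1).map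
          (fun i => (PySem.List.pyGetD (pvPrimesB end_) i 0, PySem.List.pyGetD (pvPrimesB end_) (i + 1) 0))).foldl
          (fun tw ab => if ab.2 = ab.1 + 2 then PySem.Set.add (PySem.Set.add tw ab.1) ab.2 else tw)
          PySem.Set.empty := by rw [List.foldl_map]
    _ = ((pvPrimesB end_).zip ((pvPrimesB end_).drop 1)).foldl
          (fun tw ab => if ab.2 = ab.1 + 2 then PySem.Set.add (PySem.Set.add tw ab.1) ab.2 else tw)
          PySem.Set.empty := by rw [hmap]
    _ = ((pvPrimesB end_).zip ((pvPrimesB end_).drop 1)).foldl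
          (fun tw ab => if ab.2 - ab.1 = 2 then PySem.Set.add (PySem.Set.add tw ab.1) ab.2 else tw)
          PySem.Set.empty := by
          apply pv_foldl_eq (fun _ => True) _ _ _ _ trivial
          intro a ab _ _
          refine ⟨?_, trivial⟩
          by_cases hc : ab.2 = ab.1 + 2
          · rw [if_pos hc, if_pos (by omega)]
          · rw [if_neg hc, if_neg (by omega)]

-- a single sieve write of False never turns an entry True
theorem pv_pySetD_false_true {t : List Bool} {m : Int} (hm : 0 ≤ m) {k : Nat}
    (h : (PySem.List.pySetD t m false)[k]? = some true) : t[k]? = some true := by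
  rw [PySem.List.pySetD_of_nonneg t false hm] at h
  rw [List.getElem?_set] at h
  split_ifs at h <;> simp_all

-- every True entry of the finished sieve is at index ≥ 2
theorem pv_sieve_lowfalse (end_ : Int) (h : 0 ≤ end_) (k : Nat)
    (hk : (pvSieveB end_)[k]? = some true) : 2 ≤ k := by
  unfold pvSieveB at hk
  set sieve1 := PySem.List.pySetD
      (PySem.List.pySetD (List.replicate (end_ + 1).toNat true) 0 false) 1 false with hs1
  have hmono : sieve1[k]? = some true := by
    revert hk
    have := pv_foldl_inv
      (fun t : List Bool => t[k]? = some true → sieve1[k]? = some true)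
      (fun s i =>
        if PySem.List.pyGetD s i false then
          (PySem.List.pyRange (i * i) (end_ + 1) i).foldl
            (fun t m => PySem.List.pySetD t m false) s
        else s)
      (PySem.List.pyRange 2 (pvISqrt end_ + 1) 1) sieve1 (fun h => h)
    exact this (by
      intro a i hi ha
      intro hfin
      simp only at hfin
      apply ha
      by_cases hg : PySem.List.pyGetD a i false = true
      · rw [if_pos hg] at hfin
        revert hfin
        have hi2 : (2 : Int) ≤ i := (PySem.List.mem_pyRange_one.mp hi).1
        exact pv_foldl_inv
          (fun t : List Bool => t[k]? = some true → a[k]? = some true)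
          (fun t m => PySem.List.pySetD t m false)
          (PySem.List.pyRange (i * i) (end_ + 1) i) a (fun h => h)
          (by
            intro t m hm ht hset
            apply ht
            have hmpos : 0 ≤ m := by
              have := ((PySem.List.mem_pyRange_iff_of_pos (a := i*i) (b := end_+1) (s := i) (by omega)) m).mp hm
              nlinarith [this.1]
            exact pv_pySetD_false_true hmpos hset)
      · rw [if_neg hg] at hfin; exact hfin)
  -- now read off sieve1 at k < 2
  by_contra hlt
  simp only [not_le] at hlt
  interval_cases k <;>
  · rw [hs1] at hmono
    rw [PySem.List.pySetD_of_nonneg _ false (by norm_num),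
        PySem.List.pySetD_of_nonneg _ false (by norm_num)] at hmono
    simp only [List.getElem?_set] at hmono
    split_ifs at hmono <;> simp_all

-- members of primes are indices ≥ 2
theorem pv_primes_ge_two (end_ : Int) (h : 0 ≤ end_) :
    ∀ x ∈ pvPrimesB end_, 2 ≤ x := by
  intro x hx
  unfold pvPrimesB at hx
  rcases List.mem_map.mp hx with ⟨p, hp, rfl⟩
  rcases List.mem_filter.mp hp with ⟨hpe, hp2⟩
  rw [PySem.List.mem_enumerate_iff] at hpe
  rcases hpe with ⟨k, hk, rfl⟩
  have htrue : (pvSieveB end_)[k]? = some true := by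
    rw [List.getElem?_eq_getElem hk]
    simpa using hp2
  have := pv_sieve_lowfalse end_ h k htrue
  simp only [zero_add]
  exact_mod_cast this

theorem pv_twins_ge_two (end_ : Int) (h : 0 ≤ end_) :
    ∀ x ∈ pvTwinsB end_, 2 ≤ x := by
  intro x hx
  unfold pvTwinsB at hx
  rw [pv_mem_twinfold (fun ab => ab.2 - ab.1 = 2)] at hx
  rcases hx with hx | ⟨ab, hab, _, hx⟩
  · simp [PySem.Set.empty] at hx
  · have h1 := List.of_mem_zip hab
    rcases hx with rfl | rfl
    · exact pv_primes_ge_two end_ h _ h1.1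
    · exact pv_primes_ge_two end_ h _ (List.mem_of_mem_drop h1.2)

-- membership through the inner sum-collecting fold
theorem pv_mem_addfold (C : Int → Prop) [DecidablePred C] (g : Int → Int) :
    ∀ (l : List Int) (s : PySem.Set Int) (x : Int),
      (x ∈ l.foldl (fun r q => if C q then PySem.Set.add r (g q) else r) s) ↔
        x ∈ s ∨ ∃ q ∈ l, C q ∧ x = g q := by
  intro l
  induction l with
  | nil => simp
  | cons q l ih =>
    intro s x
    simp only [List.foldl_cons, List.mem_cons]
    by_cases hc : C q
    · rw [if_pos hc, ih]
      simp only [PySem.Set.mem_add]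
      constructor
      · rintro ((h | h) | ⟨r, hr, h1, h2⟩)
        · exact Or.inl h
        · exact Or.inr ⟨q, Or.inl rfl, hc, h⟩
        · exact Or.inr ⟨r, Or.inr hr, h1, h2⟩
      · rintro (h | ⟨r, (rfl | hr), h1, h2⟩)
        · exact Or.inl (Or.inl h)
        · exact Or.inl (Or.inr h2)
        · exact Or.inr ⟨r, hr, h1, h2⟩
    · rw [if_neg hc, ih]
      constructor
      · rintro (h | ⟨r, hr, h1, h2⟩)
        · exact Or.inl h
        · exact Or.inr ⟨r, Or.inr hr, h1, h2⟩
      · rintro (h | ⟨r, (rfl | hr), h1, h2⟩)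
        · exact Or.inl h
        · exact absurd h1 hc
        · exact Or.inr ⟨r, hr, h1, h2⟩

theorem pv_result_mem (start end_ : Int) (h : 0 ≤ end_) :
    ∀ x, x ∈ pvResultA start end_ ↔
      ∃ p ∈ pvTwinsB end_, ∃ q ∈ pvTwinsB end_,
        (start ≤ p + q ∧ p + q ≤ end_ ∧ PySem.Int.mod (p + q) 2 = 0) ∧ x = p + q := by
  intro x
  unfold pvResultA
  rw [pv_twins_eq end_ h]
  set T := pvTwinsB end_ with hT
  have gen : ∀ (l : List Int) (s : PySem.Set Int),
      (x ∈ l.foldl (fun r p =>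
          T.foldl (fun r q =>
            if start ≤ p + q ∧ p + q ≤ end_ ∧ PySem.Int.mod (p + q) 2 = 0 then
              PySem.Set.add r (p + q)
            else r) r) s) ↔
        x ∈ s ∨ ∃ p ∈ l, ∃ q ∈ T,
          (start ≤ p + q ∧ p + q ≤ end_ ∧ PySem.Int.mod (p + q) 2 = 0) ∧ x = p + q := by
    intro l
    induction l with
    | nil => simp
    | cons p l ih =>
      intro s
      simp only [List.foldl_cons, List.mem_cons]
      rw [ih, pv_mem_addfold (fun q => start ≤ p + q ∧ p + q ≤ end_ ∧ PySem.Int.mod (p + q) 2 = 0) (fun q => p + q)]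
      constructor
      · rintro ((h | ⟨q, hq, h1, h2⟩) | ⟨r, hr, q, hq, h1, h2⟩)
        · exact Or.inl h
        · exact Or.inr ⟨p, Or.inl rfl, q, hq, h1, h2⟩
        · exact Or.inr ⟨r, Or.inr hr, q, hq, h1, h2⟩
      · rintro (h | ⟨r, (rfl | hr), q, hq, h1, h2⟩)
        · exact Or.inl (Or.inl h)
        · exact Or.inl (Or.inr ⟨q, hq, h1, h2⟩)
        · exact Or.inr ⟨r, hr, q, hq, h1, h2⟩
  have := gen T PySem.Set.empty
  rw [this]
  simp [PySem.Set.empty]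

theorem pv_result_nodup (start end_ : Int) : (pvResultA start end_).Nodup := by
  unfold pvResultA
  apply pv_foldl_inv (fun s : PySem.Set Int => s.Nodup)
  · exact List.nodup_nil
  · intro a p _ ha
    apply pv_foldl_inv (fun s : PySem.Set Int => s.Nodup) _ _ _ ha
    intro b q _ hb
    by_cases hc : start ≤ p + q ∧ p + q ≤ end_ ∧ PySem.Int.mod (p + q) 2 = 0
    · rw [if_pos hc]; exact PySem.Set.nodup_add _ _ hb
    · rw [if_neg hc]; exact hb

-- ===== VERDICT (by name: the statement is the Claim_ definition above) =====
theorem generate_twin_adjacent_py_spec : Claim_equal_generate_twin_adjacent_py := by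
  intro start end_ _
  unfold Spec_generate_twin_adjacent_py generate_twin_adjacent_py generate_twin_adjacent_py_alt
  by_cases h6 : end_ < 6
  · simp [h6]
  · rw [if_neg h6, if_neg h6]
    have h0 : 0 ≤ end_ := by omega
    set ys := (PySem.List.pyRange (max start 4) (end_ + 1) 1).filter
      (fun s => decide (PySem.Int.mod s 2 = 0) &&
        (pvTwinsB end_).any (fun p => PySem.Set.contains (pvTwinsB end_) (s - p))) with hys
    have hpw : ys.Pairwise (fun a b => (fun x : Int => x) a < (fun x : Int => x) b) := by
      exact List.Pairwise.filter _ (PySem.List.pairwise_lt_pyRange_one _ _)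
    have hysnd : ys.Nodup := hpw.imp (fun hab => ne_of_lt hab)
    have hmem : ∀ a : Int, a ∈ ys ↔ a ∈ pvResultA start end_ := by
      intro a
      rw [hys, List.mem_filter, PySem.List.mem_pyRange_one,
          pv_result_mem start end_ h0 a]
      simp only [Bool.and_eq_true, decide_eq_true_eq, List.any_eq_true,
        PySem.Set.contains_iff]
      constructor
      · rintro ⟨⟨hlo, hhi⟩, hmod, p, hp, hq⟩
        exact ⟨p, hp, a - p, hq, ⟨by omega, by omega, by rwa [show p + (a - p) = a by ring]⟩, by ring⟩
      · rintro ⟨p, hp, q, hq, ⟨h1, h2, h3⟩, rfl⟩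
        have hp2 := pv_twins_ge_two end_ h0 p hp
        have hq2 := pv_twins_ge_two end_ h0 q hq
        exact ⟨⟨by omega, by omega⟩, h3, p, hp, by rwa [show p + q - p = q by ring]⟩
    have hperm : ys.Perm (pvResultA start end_) :=
      (List.perm_ext_iff_of_nodup hysnd (pv_result_nodup start end_)).mpr hmem
    exact PySem.List.sorted_eq_of_perm_of_pairwise_lt _ _ _ hperm hpw
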